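-- pv_equiv track=rewrite | github.com/dimozino/4-solvents | merge_itp.py | strip_mt_header
-- ===== SOURCE A (Python) =====
-- def strip_mt_header(block_lines):
--     """Strip [ moleculetype ] header and name from a block."""
--     out = []
--     skipping = False
--     mt_seen = False
--     for ln in block_lines:
--         if ln.strip().lower().startswith("[ moleculetype ]"):
--             skipping = True
--             mt_seen = True
--             continue
--         if skipping:
--             if ln.strip() and not ln.lstrip().startswith(";"):
--                 skipping = False
--                 continue
--             continue
--         out.append(ln)
--     if not mt_seen:
--         return block_lines
--     return out
-- ===== SOURCE B (Python) =====
-- def strip_mt_header(block_lines):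
--     """Strip [ moleculetype ] header and name from a block."""
--
--     def is_header(ln):
--         return ln.strip().lower().startswith("[ moleculetype ]")
--
--     def is_blank_or_comment(ln):
--         return not ln.strip() or ln.lstrip().startswith(";")
--
--     out = []
--     mt_seen = False
--     i, n = 0, len(block_lines)
--     while i < n:
--         ln = block_lines[i]
--         if is_header(ln):
--             mt_seen = True
--             i += 1
--             # skip blank / comment lines after the header
--             while i < n and is_blank_or_comment(block_lines[i]):
--                 i += 1
--             # skip the molecule name line (a new section header re-triggers instead)
--             if i < n and not is_header(block_lines[i]):
--                 i += 1
--             continue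
--         out.append(ln)
--         i += 1
--     return out if mt_seen else block_lines
-- ===== Notes on version B (the rewrite author's own statement) =====
-- stated objective: alternative
-- what changed: Replaces A's per-line boolean state machine (skipping/mt_seen flags threaded through one for-loop) by an explicit index while-loop that, on seeing a header, consumes the blank/comment run and the name line in dedicated inner loops, so no skipping flag exists.
import Mathlib
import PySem

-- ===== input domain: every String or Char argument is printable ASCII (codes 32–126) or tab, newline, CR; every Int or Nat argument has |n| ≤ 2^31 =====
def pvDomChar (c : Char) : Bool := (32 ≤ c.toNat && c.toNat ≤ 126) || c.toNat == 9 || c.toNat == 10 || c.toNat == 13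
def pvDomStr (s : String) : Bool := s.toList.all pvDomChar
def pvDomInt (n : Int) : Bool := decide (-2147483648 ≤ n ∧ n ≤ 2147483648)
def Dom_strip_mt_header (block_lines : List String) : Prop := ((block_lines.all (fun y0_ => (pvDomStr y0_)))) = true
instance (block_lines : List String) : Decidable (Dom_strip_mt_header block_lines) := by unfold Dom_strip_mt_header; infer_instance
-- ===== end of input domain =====

-- B replaces A's skipping/mt_seen boolean state machine by an index-style loop with dedicated
-- inner skips for the blank/comment run and the name line; same O(n), objective: alternative.

-- ===== PORT A =====
-- A: one for-loop threading (out, skipping, mt_seen); ported as a foldl over that exact state.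
def strip_mt_header (block_lines : List String) : List String :=
  let st := block_lines.foldl
    (fun (s : List String × Bool × Bool) ln =>
      if PySem.Str.startswith (PySem.Str.lower (PySem.Str.strip ln)) "[ moleculetype ]" then
        (s.1, true, true)
      else if s.2.1 then
        if !(PySem.Str.strip ln == "") && !(PySem.Str.startswith (PySem.Str.lstrip ln) ";") then
          (s.1, false, s.2.2)
        else (s.1, true, s.2.2)
      else (s.1 ++ [ln], s.2.1, s.2.2))
    ([], false, false)
  if st.2.2 then st.1 else block_lines

-- ===== PORT B =====
-- Source B's is_header
def pvHdr (ln : String) : Bool :=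
  PySem.Str.startswith (PySem.Str.lower (PySem.Str.strip ln)) "[ moleculetype ]"

-- Source B's is_blank_or_comment
def pvSkippable (ln : String) : Bool :=
  (PySem.Str.strip ln == "") || PySem.Str.startswith (PySem.Str.lstrip ln) ";"

-- Source B's inner while: skip blank / comment lines after the header
def pvSkipBC : List String → List String
  | [] => []
  | x :: xs => if pvSkippable x then pvSkipBC xs else x :: xs

-- Source B's `if i < n and not is_header(...): i += 1` (skip the name line)
def pvDropName : List String → List String
  | [] => []
  | x :: xs => if pvHdr x then x :: xs else xs

theorem pvSkipBC_len : ∀ ls : List String, (pvSkipBC ls).length ≤ ls.length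
  | [] => le_refl _
  | x :: xs => by
    simp only [pvSkipBC]
    split
    · exact le_trans (pvSkipBC_len xs) (Nat.le_succ _)
    · exact le_refl _

theorem pvDropName_len : ∀ ls : List String, (pvDropName ls).length ≤ ls.length
  | [] => le_refl _
  | x :: xs => by
    simp only [pvDropName]
    split
    · exact le_refl _
    · exact Nat.le_succ _

-- Source B's outer while loop, consuming the remaining lines; returns (out, mt_seen)
def pvGoB : List String → Bool → List String × Bool
  | [], mt => ([], mt)
  | ln :: rest, mt =>
    if pvHdr ln then
      pvGoB (pvDropName (pvSkipBC rest)) true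
    else
      let p := pvGoB rest mt
      (ln :: p.1, p.2)
termination_by ls _ => ls.length
decreasing_by
  · exact Nat.lt_succ_of_le (le_trans (pvDropName_len _) (pvSkipBC_len _))
  · exact Nat.lt_succ_self _

def strip_mt_header_alt (block_lines : List String) : List String :=
  let p := pvGoB block_lines false
  if p.2 then p.1 else block_lines

-- ===== PRECONDITION & SPEC =====
def Spec_strip_mt_header (block_lines : List String) (out : List String) : Prop := out = strip_mt_header_alt block_lines
instance (block_lines : List String) (out : List String) : Decidable (Spec_strip_mt_header block_lines out) := by unfold Spec_strip_mt_header; infer_instance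

-- ===== CLAIM (what is proved, stated in full; the proofs are below) =====
def Claim_equal_strip_mt_header : Prop := ∀ (block_lines : List String), Dom_strip_mt_header block_lines → Spec_strip_mt_header block_lines (strip_mt_header block_lines)

-- ===== LEMMAS AND PROOFS =====

-- A's fold step, named for the proofs (definitionally the lambda in strip_mt_header)
def pvStepA (s : List String × Bool × Bool) (ln : String) : List String × Bool × Bool :=
  if PySem.Str.startswith (PySem.Str.lower (PySem.Str.strip ln)) "[ moleculetype ]" then
    (s.1, true, true)
  else if s.2.1 then
    if !(PySem.Str.strip ln == "") && !(PySem.Str.startswith (PySem.Str.lstrip ln) ";") then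
      (s.1, false, s.2.2)
    else (s.1, true, s.2.2)
  else (s.1 ++ [ln], s.2.1, s.2.2)

theorem pvStepA_hdr (s : List String × Bool × Bool) (ln : String) (h : pvHdr ln = true) :
    pvStepA s ln = (s.1, true, true) := by
  have h' : PySem.Str.startswith (PySem.Str.lower (PySem.Str.strip ln)) "[ moleculetype ]" = true := h
  simp only [pvStepA, h', reduceIte]

theorem pvStepA_skip_skippable (s : List String × Bool × Bool) (ln : String)
    (h : pvSkippable ln = true) (hs : s.2.1 = true) (hm : s.2.2 = true) :
    pvStepA s ln = (s.1, true, true) := by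
  simp only [pvSkippable, Bool.or_eq_true] at h
  rcases (Bool.eq_false_or_eq_true (pvHdr ln)).symm with hh | hh
  · have h' : PySem.Str.startswith (PySem.Str.lower (PySem.Str.strip ln)) "[ moleculetype ]" = false := hh
    rcases h with h | h <;>
      simp only [pvStepA, h', Bool.false_eq_true, reduceIte, hs, h, Bool.not_true,
        Bool.false_and, Bool.and_false, hm]
  · have h' : PySem.Str.startswith (PySem.Str.lower (PySem.Str.strip ln)) "[ moleculetype ]" = true := hh
    simp only [pvStepA, h', reduceIte]

theorem pvStepA_skip_name (s : List String × Bool × Bool) (ln : String)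
    (hh : pvHdr ln = false) (h : pvSkippable ln = false) (hs : s.2.1 = true) :
    pvStepA s ln = (s.1, false, s.2.2) := by
  have h' : PySem.Str.startswith (PySem.Str.lower (PySem.Str.strip ln)) "[ moleculetype ]" = false := hh
  simp only [pvSkippable, Bool.or_eq_false_iff] at h
  simp only [pvStepA, h', Bool.false_eq_true, reduceIte, hs, h.1, h.2, Bool.not_false,
    Bool.and_self]

theorem pvStepA_plain (s : List String × Bool × Bool) (ln : String)
    (hh : pvHdr ln = false) (hs : s.2.1 = false) :
    pvStepA s ln = (s.1 ++ [ln], false, s.2.2) := by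
  have h' : PySem.Str.startswith (PySem.Str.lower (PySem.Str.strip ln)) "[ moleculetype ]" = false := hh
  simp only [pvStepA, h', Bool.false_eq_true, reduceIte, hs]

-- The central invariant: A's fold from a non-skipping state realises pvGoB,
-- and from a skipping state realises pvGoB after pvDropName ∘ pvSkipBC.
theorem pvMain : ∀ ls : List String,
    (∀ (out : List String) (mt : Bool),
      (List.foldl pvStepA (out, false, mt) ls).1 = out ++ (pvGoB ls mt).1 ∧
      (List.foldl pvStepA (out, false, mt) ls).2.2 = (pvGoB ls mt).2) ∧
    (∀ out : List String,
      (List.foldl pvStepA (out, true, true) ls).1 = out ++ (pvGoB (pvDropName (pvSkipBC ls)) true).1 ∧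
      (List.foldl pvStepA (out, true, true) ls).2.2 = (pvGoB (pvDropName (pvSkipBC ls)) true).2)
  | [] => by
    refine ⟨?_, ?_⟩
    · intro out mt; simp [pvGoB]
    · intro out; simp [pvSkipBC, pvDropName, pvGoB]
  | x :: xs => by
    obtain ⟨ih1, ih2⟩ := pvMain xs
    refine ⟨?_, ?_⟩
    · intro out mt
      rcases (Bool.eq_false_or_eq_true (pvHdr x)).symm with hh | hh
      · -- plain line: appended
        obtain ⟨h1, h2⟩ := ih1 (out ++ [x]) mt
        simp only [List.foldl_cons, pvStepA_plain (out, false, mt) x hh rfl]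
        simp [pvGoB, hh, h1, h2]
      · -- header: enter skipping state
        obtain ⟨h1, h2⟩ := ih2 out
        simp only [List.foldl_cons, pvStepA_hdr (out, false, mt) x hh]
        simp [pvGoB, hh, h1, h2]
    · intro out
      rcases (Bool.eq_false_or_eq_true (pvSkippable x)).symm with hsk | hsk
      · rcases (Bool.eq_false_or_eq_true (pvHdr x)).symm with hh | hh
        · -- the name line: consumed, skipping ends
          obtain ⟨h1, h2⟩ := ih1 out true
          simp only [List.foldl_cons, pvStepA_skip_name (out, true, true) x hh hsk rfl]
          simp [pvSkipBC, pvDropName, hsk, hh, h1, h2]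
        · -- another header while skipping: A re-triggers, B's loop re-triggers too
          obtain ⟨h1, h2⟩ := ih2 out
          simp only [List.foldl_cons, pvStepA_hdr (out, true, true) x hh]
          simp [pvSkipBC, pvDropName, pvGoB, hsk, hh, h1, h2]
      · -- blank/comment line: skipped on both sides
        obtain ⟨h1, h2⟩ := ih2 out
        simp only [List.foldl_cons, pvStepA_skip_skippable (out, true, true) x hsk rfl rfl]
        simp [pvSkipBC, hsk, h1, h2]

-- ===== VERDICT (by name: the statement is the Claim_ definition above) =====
theorem strip_mt_header_spec : Claim_equal_strip_mt_header := by
  intro bl _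
  unfold Spec_strip_mt_header strip_mt_header strip_mt_header_alt
  obtain ⟨h1, h2⟩ := (pvMain bl).1 [] false
  change (if (List.foldl pvStepA ([], false, false) bl).2.2 = true then
            (List.foldl pvStepA ([], false, false) bl).1 else bl) =
         (if (pvGoB bl false).2 = true then (pvGoB bl false).1 else bl)
  rw [h2]
  rcases (Bool.eq_false_or_eq_true (pvGoB bl false).2).symm with hm | hm
  · simp [hm]
  · simp only [hm, reduceIte]
    simpa using h1
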